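-- pv_equiv track=rewrite | github.com/ryan5500/punkt_detection | PunktDetector.py | punkt_decode
-- ===== SOURCE A (Python) =====
-- def punkt_decode(sentence, punkt_pos, punkt='。'):
--     words = sentence.split(' ')
--     pnkt_sent = []
--     for i in range(len(words)):
--         pnkt_sent.append(words[i])
--         if i+1 in punkt_pos:
--             pnkt_sent.append(punkt)
--     return ' '.join(pnkt_sent)
-- ===== SOURCE B (Python) =====
-- def punkt_decode(sentence, punkt_pos, punkt='。'):
--     def go(words, i):
--         if not words:
--             return []
--         head = [words[0], punkt] if i in punkt_pos else [words[0]]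
--         return head + go(words[1:], i + 1)
--     return ' '.join(go(sentence.split(' '), 1))
-- ===== Notes on version B (the rewrite author's own statement) =====
-- stated objective: alternative
-- what changed: Replaces A's indexed loop that appends into a shared accumulator with a structural recursion over the word list carrying the 1-based position, emitting [word] or [word, punkt] per step and concatenating.
import Mathlib
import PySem

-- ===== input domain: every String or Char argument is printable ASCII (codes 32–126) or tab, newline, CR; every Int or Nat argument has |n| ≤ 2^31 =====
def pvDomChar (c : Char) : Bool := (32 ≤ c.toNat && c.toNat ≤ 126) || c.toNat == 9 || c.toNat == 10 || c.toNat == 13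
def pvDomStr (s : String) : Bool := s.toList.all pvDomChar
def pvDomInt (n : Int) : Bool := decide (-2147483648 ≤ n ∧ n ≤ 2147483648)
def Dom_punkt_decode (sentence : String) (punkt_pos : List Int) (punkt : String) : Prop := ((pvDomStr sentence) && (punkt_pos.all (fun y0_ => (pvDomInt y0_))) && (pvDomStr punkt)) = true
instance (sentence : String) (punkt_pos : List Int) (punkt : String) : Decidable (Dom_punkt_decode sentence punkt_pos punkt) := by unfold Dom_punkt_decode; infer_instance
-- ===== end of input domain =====

-- B replaces A's indexed append-as-you-go loop with a structural recursion over the word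
-- list carrying the 1-based position (alternative decomposition, same cost).


-- ===== PORT A =====
def punkt_decode (sentence : String) (punkt_pos : List Int) (punkt : String) : String :=
  let words := (PySem.Str.split? sentence " ").getD []      -- sep " " ≠ "" so split? is some
  let pnkt_sent := (PySem.List.pyRange 0 words.length 1).foldl
      (fun acc i =>
        let acc := acc ++ [PySem.List.pyGetD words i ""]
        if (i + 1) ∈ punkt_pos then acc ++ [punkt] else acc) []
  PySem.Str.join " " pnkt_sent

-- ===== PORT B =====
-- inner recursive helper 'go' of Source B: words[0]/words[1:] = head/tail
def punkt_decode_go (punkt_pos : List Int) (punkt : String) : List String → Int → List String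
  | [], _ => []
  | w :: ws, i =>
      (if i ∈ punkt_pos then [w, punkt] else [w]) ++ punkt_decode_go punkt_pos punkt ws (i + 1)

def punkt_decode_alt (sentence : String) (punkt_pos : List Int) (punkt : String) : String :=
  PySem.Str.join " " (punkt_decode_go punkt_pos punkt ((PySem.Str.split? sentence " ").getD []) 1)

-- ===== PRECONDITION & SPEC =====
def Spec_punkt_decode (sentence : String) (punkt_pos : List Int) (punkt : String) (out : String) : Prop := out = punkt_decode_alt sentence punkt_pos punkt
instance (sentence : String) (punkt_pos : List Int) (punkt : String) (out : String) : Decidable (Spec_punkt_decode sentence punkt_pos punkt out) := by unfold Spec_punkt_decode; infer_instance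

-- ===== CLAIM (what is proved, stated in full; the proofs are below) =====
def Claim_equal_punkt_decode : Prop := ∀ (sentence : String) (punkt_pos : List Int) (punkt : String), Dom_punkt_decode sentence punkt_pos punkt → Spec_punkt_decode sentence punkt_pos punkt (punkt_decode sentence punkt_pos punkt)

-- ===== LEMMAS AND PROOFS =====

-- A's enumerate-style fold produces exactly B's recursion at start index s+1
theorem pvEnumFold_eq_go (pp : List Int) (punkt : String) (ws : List String)
    (s : Int) (acc : List String) :
    (PySem.List.enumerate ws s).foldl
        (fun acc iw =>
          let acc := acc ++ [iw.2]
          if (iw.1 + 1) ∈ pp then acc ++ [punkt] else acc) acc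
      = acc ++ punkt_decode_go pp punkt ws (s + 1) := by
  induction ws generalizing s acc with
  | nil => simp [PySem.List.enumerate_nil, punkt_decode_go]
  | cons w ws ih =>
    rw [PySem.List.enumerate_cons]
    simp only [List.foldl_cons]
    rw [ih]
    by_cases hmem : (s + 1) ∈ pp
    · simp [punkt_decode_go, if_pos hmem]
    · simp [punkt_decode_go, if_neg hmem]

-- ===== VERDICT (by name: the statement is the Claim_ definition above) =====
theorem punkt_decode_spec : Claim_equal_punkt_decode := by
  intro sentence punkt_pos punkt _
  unfold Spec_punkt_decode
  show punkt_decode sentence punkt_pos punkt = punkt_decode_alt sentence punkt_pos punkt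
  simp only [punkt_decode, punkt_decode_alt]
  generalize (PySem.Str.split? sentence " ").getD [] = words
  congr 1
  have hmap := PySem.List.enumerate_eq_map_pyRange (xs := words) (d := "")
  have h := pvEnumFold_eq_go punkt_pos punkt words 0 []
  rw [hmap, List.foldl_map] at h
  simpa [PySem.List.len_eq] using h
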